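-- pv_equiv track=rewrite | github.com/Hellin22/BOJPerDay | 프로그래머스/3/92344. 파괴되지 않은 건물/파괴되지 않은 건물.py | solution
-- ===== SOURCE A (Python) =====
-- def solution(board, skill):
--
--     n, m = len(board), len(board[0])
--     answer = n*m
--
--     # 이거 n+2, m+2로 구성 -> 실제 i, j 값은 +1, +1로
--     dp = [[0] * (m+2) for _ in range(n+2)]
--     # for i in range(n):
--     #     for j in range(m):
--     #         dp[i+1][j+1] = board[i][j]
--     # skill의 각 행은 [type, r1, c1, r2, c2, degree]형태
--     for type, r1, c1, r2, c2, degree in skill: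
--         if type == 1: degree *= -1
--         r1, c1, r2, c2 = r1+1, c1+1, r2+1, c2+1
--         dp[r1][c1] += degree
--         dp[r1][c2+1] -= degree
--         dp[r2+1][c1] -= degree
--         dp[r2+1][c2+1] += degree
--
--     for i in range(1, n+1):
--         for j in range(1, m+1):
--             dp[i][j] += dp[i][j-1]
--     for j in range(1, m+1):
--         for i in range(1, n+1):
--             dp[i][j] += dp[i-1][j]
--
--     for i in range(n):
--         for j in range(m):
--             board[i][j] += dp[i+1][j+1]
--             if board[i][j] <= 0: answer-=1
--
--     return answer
-- ===== SOURCE B (Python) =====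
-- def solution(board, skill):
--     # Per-cell direct evaluation: for each cell sum the degrees of the skills
--     # whose rectangle covers it, and count the cells that stay positive.
--     # (A mutates board in place; B does not — the equivalence is about the return value.)
--     n, m = len(board), len(board[0])
--     count = 0
--     for i in range(n):
--         for j in range(m):
--             v = board[i][j]
--             for t, r1, c1, r2, c2, deg in skill:
--                 if r1 <= i <= r2 and c1 <= j <= c2:
--                     v += -deg if t == 1 else deg
--             if v > 0:
--                 count += 1
--     return count
-- ===== Notes on version B (the rewrite author's own statement) =====
-- stated objective: alternative
-- what changed: Replaces the 2D difference array with its four corner deltas and the two prefix-sum passes by a direct per-cell evaluation that sums, for each cell, the degrees of the skills whose rectangle covers it, and counts positive cells; B does not mutate board (A does).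
-- outside the precondition, e.g. on solution([[1], [1]], [[0, -2, 0, 0, 0, 5]]): A returns 1, B returns 2; on solution([[1, 1, 1]], [[0, 0, 2, 0, 0, 5]]): A returns 2, B returns 3
import Mathlib
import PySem

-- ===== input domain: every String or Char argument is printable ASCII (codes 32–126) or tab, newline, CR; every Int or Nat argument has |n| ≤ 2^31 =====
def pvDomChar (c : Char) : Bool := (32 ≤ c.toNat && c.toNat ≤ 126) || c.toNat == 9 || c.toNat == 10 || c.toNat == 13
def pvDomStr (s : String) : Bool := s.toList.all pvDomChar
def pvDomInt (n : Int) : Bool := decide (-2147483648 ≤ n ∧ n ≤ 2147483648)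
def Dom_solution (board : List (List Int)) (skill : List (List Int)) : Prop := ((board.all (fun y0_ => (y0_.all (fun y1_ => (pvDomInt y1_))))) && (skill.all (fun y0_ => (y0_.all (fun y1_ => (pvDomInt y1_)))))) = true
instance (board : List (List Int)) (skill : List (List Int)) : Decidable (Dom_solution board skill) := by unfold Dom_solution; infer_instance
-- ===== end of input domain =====

-- B replaces A's 2D difference array (corner deltas + two prefix-sum passes) by a direct
-- per-cell sum over the covering skills; same return value. A mutates `board` in place and
-- B does not: the equivalence proved here is about the RETURN value only.

-- ===== PORT A =====
-- grid read `g[i][j]` (shared by both ports): exact for non-negative in-range indices, which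
-- all uses are under Pre_ (Python would wrap a negative index)
def pvGet2 (g : List (List Int)) (i j : Int) : Int :=
  (g.getD i.toNat []).getD j.toNat 0

-- `g[i][j] += d`: exact for non-negative in-range indices (all uses are, under Pre_)
def pvBump (g : List (List Int)) (i j : Int) (d : Int) : List (List Int) :=
  g.modify i.toNat (fun row => row.modify j.toNat (· + d))

-- body of `for type, r1, c1, r2, c2, degree in skill:` (a row of another arity raises
-- ValueError in Python; Pre_ excludes it)
def skStepA (dp : List (List Int)) (s : List Int) : List (List Int) :=
  match s with
  | [t, r1, c1, r2, c2, degree] =>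
    let degree := if t = 1 then -degree else degree
    let r1 := r1 + 1
    let c1 := c1 + 1
    let r2 := r2 + 1
    let c2 := c2 + 1
    let dpa := pvBump dp r1 c1 degree
    let dpb := pvBump dpa r1 (c2 + 1) (-degree)
    let dpc := pvBump dpb (r2 + 1) c1 (-degree)
    pvBump dpc (r2 + 1) (c2 + 1) degree
  | _ => dp

-- `dp[i][j] += dp[i][j-1]`
def rowStepA (dp : List (List Int)) (i j : Int) : List (List Int) :=
  pvBump dp i j (pvGet2 dp i (j - 1))

-- `dp[i][j] += dp[i-1][j]`
def colStepA (dp : List (List Int)) (j i : Int) : List (List Int) :=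
  pvBump dp i j (pvGet2 dp (i - 1) j)

-- `board[i][j] += dp[i+1][j+1]; if board[i][j] <= 0: answer -= 1` (each board cell is read
-- exactly once, so reading the untouched board is exact for the returned value)
def cellStepA (board dp : List (List Int)) (answer : Int) (i j : Int) : Int :=
  if pvGet2 board i j + pvGet2 dp (i + 1) (j + 1) ≤ 0 then answer - 1 else answer

def solution (board : List (List Int)) (skill : List (List Int)) : Int :=
  let n : Int := board.length
  let m : Int := (board.headD []).length
  let dp0 := List.replicate (board.length + 2) (List.replicate ((board.headD []).length + 2) (0 : Int))
  let dp1 := skill.foldl skStepA dp0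
  let dp2 := (PySem.List.pyRange 1 (n + 1) 1).foldl
      (fun dp i => (PySem.List.pyRange 1 (m + 1) 1).foldl (fun dp j => rowStepA dp i j) dp) dp1
  let dp3 := (PySem.List.pyRange 1 (m + 1) 1).foldl
      (fun dp j => (PySem.List.pyRange 1 (n + 1) 1).foldl (fun dp i => colStepA dp j i) dp) dp2
  (PySem.List.pyRange 0 n 1).foldl
      (fun answer i => (PySem.List.pyRange 0 m 1).foldl
        (fun answer j => cellStepA board dp3 answer i j) answer) (n * m)

-- ===== PORT B =====
-- body of B's `for t, r1, c1, r2, c2, deg in skill:` accumulating the cell value v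
def cellAddB (i j : Int) (v : Int) (s : List Int) : Int :=
  match s with
  | [t, r1, c1, r2, c2, deg] =>
    if r1 ≤ i ∧ i ≤ r2 ∧ c1 ≤ j ∧ j ≤ c2 then v + (if t = 1 then -deg else deg) else v
  | _ => v

def solution_alt (board : List (List Int)) (skill : List (List Int)) : Int :=
  let n : Int := board.length
  let m : Int := (board.headD []).length
  (PySem.List.pyRange 0 n 1).foldl
    (fun count i => (PySem.List.pyRange 0 m 1).foldl
      (fun count j =>
        if 0 < skill.foldl (cellAddB i j) (pvGet2 board i j) then count + 1 else count)
      count) 0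

-- ===== PRECONDITION & SPEC =====
-- Pre_ excludes inputs where A raises (empty board, a row shorter than the first row, a skill
-- row of arity != 6 or with coordinates far enough out of range to overflow dp) and the
-- out-of-contract skill rows with negative or inverted rectangle coordinates, on which A still
-- returns a value that is an accident of Python's negative-index wraparound / of the
-- difference-array corner placement.
def Pre_solution (board : List (List Int)) (skill : List (List Int)) : Prop :=
  board ≠ [] ∧
  (∀ row ∈ board, (board.headD []).length ≤ row.length) ∧
  (∀ s ∈ skill, s.length = 6 ∧
    0 ≤ s.getD 1 0 ∧ s.getD 1 0 ≤ s.getD 3 0 ∧ s.getD 3 0 < (board.length : Int) ∧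
    0 ≤ s.getD 2 0 ∧ s.getD 2 0 ≤ s.getD 4 0 ∧ s.getD 4 0 < ((board.headD []).length : Int))
instance (board : List (List Int)) (skill : List (List Int)) : Decidable (Pre_solution board skill) := by
  unfold Pre_solution; infer_instance

def pvWitness_solution : List (List Int) × List (List Int) :=
  ([[1, 2], [0, -1]], [[1, 0, 0, 1, 1, 2], [0, 0, 0, 0, 1, 1]])

def Spec_solution (board : List (List Int)) (skill : List (List Int)) (out : Int) : Prop := out = solution_alt board skill
instance (board : List (List Int)) (skill : List (List Int)) (out : Int) : Decidable (Spec_solution board skill out) := by unfold Spec_solution; infer_instance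

-- ===== CLAIM (what is proved, stated in full; the proofs are below) =====
def Claim_equal_solution : Prop := ∀ (board : List (List Int)) (skill : List (List Int)), Dom_solution board skill → Pre_solution board skill → Spec_solution board skill (solution board skill)

-- ===== LEMMAS AND PROOFS =====

-- cell (a, b) of a grid, Nat coordinates
def gget (g : List (List Int)) (a b : Nat) : Int := (g.getD a []).getD b 0

-- the grid is an R x C rectangle
def Dims (g : List (List Int)) (R C : Nat) : Prop :=
  g.length = R ∧ ∀ a : Nat, a < R → (g.getD a []).length = C

-- per-skill contribution B adds at cell (i, j)
def effAt (i j : Int) (s : List Int) : Int :=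
  match s with
  | [t, r1, c1, r2, c2, deg] =>
    if r1 ≤ i ∧ i ≤ r2 ∧ c1 ≤ j ∧ j ≤ c2 then (if t = 1 then -deg else deg) else 0
  | _ => 0

-- per-skill corner deltas A writes into dp, read at cell (a, b)
def cornerAt (s : List Int) (a b : Nat) : Int :=
  match s with
  | [t, r1, c1, r2, c2, deg] =>
    let d := if t = 1 then -deg else deg
    (if (a : Int) = r1 + 1 ∧ (b : Int) = c1 + 1 then d else 0)
    + (if (a : Int) = r1 + 1 ∧ (b : Int) = c2 + 2 then -d else 0)
    + (if (a : Int) = r2 + 2 ∧ (b : Int) = c1 + 1 then -d else 0)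
    + (if (a : Int) = r2 + 2 ∧ (b : Int) = c2 + 2 then d else 0)
  | _ => 0

-- Pre_'s condition on one skill row
def SkOK (N M : Nat) (s : List Int) : Prop :=
  s.length = 6 ∧
  0 ≤ s.getD 1 0 ∧ s.getD 1 0 ≤ s.getD 3 0 ∧ s.getD 3 0 < (N : Int) ∧
  0 ≤ s.getD 2 0 ∧ s.getD 2 0 ≤ s.getD 4 0 ∧ s.getD 4 0 < (M : Int)

theorem getD_modify {α : Type} (l : List α) (k : Nat) (f : α → α) (i : Nat) (d : α) :
    (l.modify k f).getD i d = if i = k ∧ k < l.length then f (l.getD i d) else l.getD i d := by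
  simp only [List.getD_eq_getElem?_getD, List.getElem?_modify]
  rcases Nat.lt_or_ge i l.length with h | h
  · rw [List.getElem?_eq_getElem h]
    by_cases hk : k = i <;> simp [hk] <;> omega
  · rw [List.getElem?_eq_none (by simpa using h)]
    by_cases hk : k = i <;> simp [hk] <;> omega

theorem shape6 (s : List Int) (h : s.length = 6) :
    ∃ t r1 c1 r2 c2 d : Int, s = [t, r1, c1, r2, c2, d] := by
  rcases s with _ | ⟨t, _ | ⟨r1, _ | ⟨c1, _ | ⟨r2, _ | ⟨c2, _ | ⟨d, _ | _⟩⟩⟩⟩⟩⟩ <;> simp_all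

theorem Dims_pvBump (g : List (List Int)) (R C : Nat) (x y d : Int)
    (h : Dims g R C) : Dims (pvBump g x y d) R C := by
  obtain ⟨h1, h2⟩ := h
  refine ⟨by simpa [pvBump] using h1, fun a ha => ?_⟩
  rw [pvBump, getD_modify]
  split_ifs with hc
  · rw [List.length_modify]; exact h2 a ha
  · exact h2 a ha

theorem gget_pvBump (g : List (List Int)) (R C : Nat) (x y : Int)
    (hd : Dims g R C) (hx : 0 ≤ x) (hy : 0 ≤ y) (hxR : x < (R : Int)) (hyC : y < (C : Int))
    (d : Int) (a b : Nat) :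
    gget (pvBump g x y d) a b = gget g a b + (if (a : Int) = x ∧ (b : Int) = y then d else 0) := by
  obtain ⟨h1, h2⟩ := hd
  rw [gget, pvBump, getD_modify]
  have hxg : x.toNat < g.length := by omega
  have hrow : (g.getD x.toNat []).length = C := h2 _ (h1 ▸ hxg)
  by_cases hax : a = x.toNat
  · subst hax
    rw [if_pos ⟨rfl, hxg⟩, getD_modify, hrow]
    have hyC' : y.toNat < C := by omega
    by_cases hby : b = y.toNat
    · subst hby
      rw [if_pos ⟨rfl, hyC'⟩, if_pos ⟨by omega, by omega⟩, gget]
    · rw [if_neg (by omega), if_neg (by omega), gget, add_zero]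
  · rw [if_neg (by omega), if_neg (by omega), gget, add_zero]

theorem dp0_dims (N M : Nat) :
    Dims (List.replicate (N + 2) (List.replicate (M + 2) (0 : Int))) (N + 2) (M + 2) := by
  refine ⟨by simp, fun a ha => ?_⟩
  rw [List.getD_eq_getElem?_getD, List.getElem?_replicate, if_pos ha]
  simp

theorem dp0_gget (N M : Nat) (a b : Nat) :
    gget (List.replicate (N + 2) (List.replicate (M + 2) (0 : Int))) a b = 0 := by
  simp only [gget, List.getD_eq_getElem?_getD, List.getElem?_replicate]
  split_ifs <;> simp

theorem sum_ind (I : Nat) (x v : Int) :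
    ∑ s ∈ Finset.range I, (if (s : Int) = x then v else 0)
      = if 0 ≤ x ∧ x < (I : Int) then v else 0 := by
  induction I with
  | zero =>
    rw [Finset.sum_range_zero]
    split_ifs <;> omega
  | succ n ih =>
    rw [Finset.sum_range_succ, ih]
    split_ifs <;> omega

theorem sum2_ind (I J : Nat) (x y v : Int) :
    ∑ s ∈ Finset.range I, ∑ t ∈ Finset.range J, (if (s : Int) = x ∧ (t : Int) = y then v else 0)
      = if 0 ≤ x ∧ x < (I : Int) ∧ 0 ≤ y ∧ y < (J : Int) then v else 0 := by
  have h : ∀ s : Nat, (∑ t ∈ Finset.range J, if (s : Int) = x ∧ (t : Int) = y then v else 0)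
      = if (s : Int) = x then (if 0 ≤ y ∧ y < (J : Int) then v else 0) else 0 := by
    intro s
    by_cases hs : (s : Int) = x
    · simp [hs, sum_ind]
    · simp [hs]
  rw [Finset.sum_congr rfl (fun s _ => h s), sum_ind]
  split_ifs <;> first | rfl | omega

theorem cornerAt_row0 (N M : Nat) (s : List Int) (hs : SkOK N M s) (b : Nat) :
    cornerAt s 0 b = 0 := by
  obtain ⟨h6, h⟩ := hs
  obtain ⟨t, r1, c1, r2, c2, d, rfl⟩ := shape6 s h6
  simp only [List.getD] at h
  simp only [cornerAt]
  rw [if_neg (by simp at h ⊢; omega), if_neg (by simp at h ⊢; omega),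
    if_neg (by simp at h ⊢; omega), if_neg (by simp at h ⊢; omega)]
  ring

theorem corner_rect (N M : Nat) (s : List Int) (hs : SkOK N M s) (i j : Nat) :
    ∑ a ∈ Finset.range (i + 2), ∑ b ∈ Finset.range (j + 2), cornerAt s a b
      = effAt (i : Int) (j : Int) s := by
  obtain ⟨h6, h⟩ := hs
  obtain ⟨t, r1, c1, r2, c2, d, rfl⟩ := shape6 s h6
  simp only [List.getD_cons_succ, List.getD_cons_zero] at h
  simp only [cornerAt, effAt]
  rw [show (∑ a ∈ Finset.range (i + 2), ∑ b ∈ Finset.range (j + 2),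
        ((if (a : Int) = r1 + 1 ∧ (b : Int) = c1 + 1 then (if t = 1 then -d else d) else 0)
        + (if (a : Int) = r1 + 1 ∧ (b : Int) = c2 + 2 then -(if t = 1 then -d else d) else 0)
        + (if (a : Int) = r2 + 2 ∧ (b : Int) = c1 + 1 then -(if t = 1 then -d else d) else 0)
        + (if (a : Int) = r2 + 2 ∧ (b : Int) = c2 + 2 then (if t = 1 then -d else d) else 0)))
      = (∑ a ∈ Finset.range (i + 2), ∑ b ∈ Finset.range (j + 2),
          (if (a : Int) = r1 + 1 ∧ (b : Int) = c1 + 1 then (if t = 1 then -d else d) else 0))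
      + (∑ a ∈ Finset.range (i + 2), ∑ b ∈ Finset.range (j + 2),
          (if (a : Int) = r1 + 1 ∧ (b : Int) = c2 + 2 then -(if t = 1 then -d else d) else 0))
      + (∑ a ∈ Finset.range (i + 2), ∑ b ∈ Finset.range (j + 2),
          (if (a : Int) = r2 + 2 ∧ (b : Int) = c1 + 1 then -(if t = 1 then -d else d) else 0))
      + (∑ a ∈ Finset.range (i + 2), ∑ b ∈ Finset.range (j + 2),
          (if (a : Int) = r2 + 2 ∧ (b : Int) = c2 + 2 then (if t = 1 then -d else d) else 0))
    from by rw [← Finset.sum_add_distrib, ← Finset.sum_add_distrib, ← Finset.sum_add_distrib]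
            exact Finset.sum_congr rfl fun a _ => by
              rw [← Finset.sum_add_distrib, ← Finset.sum_add_distrib, ← Finset.sum_add_distrib]]
  rw [sum2_ind, sum2_ind, sum2_ind, sum2_ind]
  split_ifs <;> omega

theorem sum_swap_list (l : List (List Int)) (f : List Int → Nat → Nat → Int) (I J : Nat) :
    ∑ a ∈ Finset.range I, ∑ b ∈ Finset.range J, (l.map (fun x => f x a b)).sum
      = (l.map (fun x => ∑ a ∈ Finset.range I, ∑ b ∈ Finset.range J, f x a b)).sum := by
  induction l with
  | nil => simp
  | cons x rest ih => simp [Finset.sum_add_distrib, ih]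

theorem cellAddB_eq (i j : Int) (v : Int) (s : List Int) :
    cellAddB i j v s = v + effAt i j s := by
  rcases s with _ | ⟨t, _ | ⟨r1, _ | ⟨c1, _ | ⟨r2, _ | ⟨c2, _ | ⟨d, _ | _⟩⟩⟩⟩⟩⟩ <;>
    simp [cellAddB, effAt]
  split_ifs <;> ring

theorem foldB (skill : List (List Int)) (i j : Int) :
    ∀ init : Int, skill.foldl (cellAddB i j) init = init + (skill.map (effAt i j)).sum := by
  induction skill with
  | nil => intro init; simp
  | cons s rest ih =>
    intro init
    rw [List.foldl_cons, ih, cellAddB_eq, List.map_cons, List.sum_cons]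
    ring

theorem skStepA_char (N M : Nat) (s : List Int) (hs : SkOK N M s)
    (dp : List (List Int)) (hd : Dims dp (N + 2) (M + 2)) :
    Dims (skStepA dp s) (N + 2) (M + 2) ∧
    ∀ a b : Nat, gget (skStepA dp s) a b = gget dp a b + cornerAt s a b := by
  obtain ⟨h6, h⟩ := hs
  obtain ⟨t, r1, c1, r2, c2, d, rfl⟩ := shape6 _ h6
  simp only [List.getD_cons_succ, List.getD_cons_zero] at h
  simp only [skStepA, cornerAt]
  set d' := if t = 1 then -d else d with hd'
  have hD1 := Dims_pvBump dp (N+2) (M+2) (r1+1) (c1+1) d' hd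
  have hD2 := Dims_pvBump _ (N+2) (M+2) (r1+1) (c2+1+1) (-d') hD1
  have hD3 := Dims_pvBump _ (N+2) (M+2) (r2+1+1) (c1+1) (-d') hD2
  have hD4 := Dims_pvBump _ (N+2) (M+2) (r2+1+1) (c2+1+1) d' hD3
  refine ⟨hD4, fun a b => ?_⟩
  rw [gget_pvBump _ (N+2) (M+2) (r2+1+1) (c2+1+1) hD3 (by omega) (by omega)
        (by push_cast; omega) (by push_cast; omega) d' a b,
      gget_pvBump _ (N+2) (M+2) (r2+1+1) (c1+1) hD2 (by omega) (by omega)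
        (by push_cast; omega) (by push_cast; omega) (-d') a b,
      gget_pvBump _ (N+2) (M+2) (r1+1) (c2+1+1) hD1 (by omega) (by omega)
        (by push_cast; omega) (by push_cast; omega) (-d') a b,
      gget_pvBump dp (N+2) (M+2) (r1+1) (c1+1) hd (by omega) (by omega)
        (by push_cast; omega) (by push_cast; omega) d' a b]
  rw [show (c2:Int)+1+1 = c2+2 from by ring, show (r2:Int)+1+1 = r2+2 from by ring]
  ring

theorem skFold_char (N M : Nat) (skill : List (List Int)) (hsk : ∀ s ∈ skill, SkOK N M s) :
    ∀ dp, Dims dp (N + 2) (M + 2) →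
    Dims (skill.foldl skStepA dp) (N + 2) (M + 2) ∧
    ∀ a b : Nat, gget (skill.foldl skStepA dp) a b
      = gget dp a b + (skill.map (fun s => cornerAt s a b)).sum := by
  induction skill with
  | nil => intro dp hd; exact ⟨hd, fun a b => by simp⟩
  | cons s rest ih =>
    intro dp hd
    have hs := hsk s (List.mem_cons_self ..)
    obtain ⟨hD1, hG1⟩ := skStepA_char N M s hs dp hd
    obtain ⟨hD2, hG2⟩ := ih (fun x hx => hsk x (List.mem_cons_of_mem _ hx)) _ hD1
    refine ⟨by simpa using hD2, fun a b => ?_⟩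
    rw [List.foldl_cons, hG2, hG1, List.map_cons, List.sum_cons]
    ring

theorem rowpass_inner (N M : Nat) (i : Int) (hi : 1 ≤ i) (hiN : i ≤ (N : Int)) :
    ∀ (K : Nat), K ≤ M → ∀ dp, Dims dp (N + 2) (M + 2) →
    Dims ((List.range K).foldl (fun dp (k : Nat) => rowStepA dp i (1 + (k : Int))) dp) (N + 2) (M + 2) ∧
    ∀ a b : Nat, gget ((List.range K).foldl (fun dp (k : Nat) => rowStepA dp i (1 + (k : Int))) dp) a b
      = if (a : Int) = i ∧ 1 ≤ b ∧ b ≤ K then ∑ t ∈ Finset.range (b + 1), gget dp a t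
        else gget dp a b := by
  intro K
  induction K with
  | zero =>
    intro _ dp hd
    refine ⟨by simpa using hd, fun a b => ?_⟩
    simp only [List.range_zero, List.foldl_nil]
    rw [if_neg (by omega)]
  | succ K ih =>
    intro hK dp hd
    obtain ⟨hDK, hGK⟩ := ih (by omega) dp hd
    rw [List.range_succ, List.foldl_append, List.foldl_cons, List.foldl_nil]
    set dpK := (List.range K).foldl (fun dp (k : Nat) => rowStepA dp i (1 + (k : Int))) dp with hdpK
    have hval : pvGet2 dpK i (1 + (K : Int) - 1) = ∑ t ∈ Finset.range (K + 1), gget dp i.toNat t := by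
      have h1 : (1 + (K : Int) - 1) = (K : Int) := by ring
      rw [h1]
      have : pvGet2 dpK i (K : Int) = gget dpK i.toNat K := by
        simp [pvGet2, gget]
      rw [this, hGK i.toNat K]
      by_cases hK1 : 1 ≤ K
      · rw [if_pos ⟨by omega, hK1, le_refl K⟩]
      · have hK0 : K = 0 := by omega
        subst hK0
        rw [if_neg (by omega), Finset.sum_range_one]
    have hbump := fun (a b : Nat) => gget_pvBump dpK (N+2) (M+2) i (1 + (K:Int)) hDK
      (by omega) (by omega) (by omega) (by push_cast; omega) (pvGet2 dpK i (1 + (K : Int) - 1)) a b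
    refine ⟨Dims_pvBump dpK (N+2) (M+2) i (1+(K:Int)) _ hDK, fun a b => ?_⟩
    rw [rowStepA, hbump a b, hval, hGK a b]
    by_cases hab : (a : Int) = i ∧ (b : Int) = 1 + (K : Int)
    · have ha : a = i.toNat := by omega
      have hb : b = K + 1 := by omega
      subst ha hb
      rw [if_neg (by omega), if_pos hab, if_pos ⟨by omega, by omega, by omega⟩]
      rw [Finset.sum_range_succ, Finset.sum_range_succ, Finset.sum_range_succ]
      ring
    · rw [if_neg hab, add_zero]
      by_cases hold : (a : Int) = i ∧ 1 ≤ b ∧ b ≤ K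
      · rw [if_pos hold, if_pos ⟨hold.1, hold.2.1, by omega⟩]
      · rw [if_neg hold, if_neg (by omega)]

theorem rowpass (N M : Nat) :
    ∀ (I : Nat), I ≤ N → ∀ dp, Dims dp (N + 2) (M + 2) →
    Dims ((List.range I).foldl
        (fun dp (k : Nat) => (List.range M).foldl (fun dp (k2 : Nat) => rowStepA dp (1 + (k : Int)) (1 + (k2 : Int))) dp)
        dp) (N + 2) (M + 2) ∧
    ∀ a b : Nat, gget ((List.range I).foldl
        (fun dp (k : Nat) => (List.range M).foldl (fun dp (k2 : Nat) => rowStepA dp (1 + (k : Int)) (1 + (k2 : Int))) dp)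
        dp) a b
      = if 1 ≤ a ∧ a ≤ I ∧ 1 ≤ b ∧ b ≤ M then ∑ t ∈ Finset.range (b + 1), gget dp a t
        else gget dp a b := by
  intro I
  induction I with
  | zero =>
    intro _ dp hd
    refine ⟨by simpa using hd, fun a b => ?_⟩
    simp only [List.range_zero, List.foldl_nil]
    rw [if_neg (by omega)]
  | succ I ih =>
    intro hI dp hd
    obtain ⟨hDI, hGI⟩ := ih (by omega) dp hd
    rw [List.range_succ, List.foldl_append, List.foldl_cons, List.foldl_nil]
    set dpI := (List.range I).foldl
        (fun dp (k : Nat) => (List.range M).foldl (fun dp (k2 : Nat) => rowStepA dp (1 + (k : Int)) (1 + (k2 : Int))) dp)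
        dp with hdpI
    obtain ⟨hDs, hGs⟩ := rowpass_inner N M (1 + (I : Int)) (by omega) (by omega) M (le_refl M) dpI hDI
    refine ⟨hDs, fun a b => ?_⟩
    rw [hGs a b]
    by_cases hrow : (a : Int) = 1 + (I : Int)
    · have ha : a = I + 1 := by omega
      subst ha
      by_cases hb : 1 ≤ b ∧ b ≤ M
      · rw [if_pos ⟨hrow, hb.1, hb.2⟩, if_pos ⟨by omega, by omega, hb.1, hb.2⟩]
        refine Finset.sum_congr rfl fun t _ => ?_
        rw [hGI (I + 1) t, if_neg (by omega)]
      · rw [if_neg (by omega), if_neg (by omega), hGI (I + 1) b, if_neg (by omega)]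
    · rw [if_neg (by omega), hGI a b]
      by_cases hold : 1 ≤ a ∧ a ≤ I ∧ 1 ≤ b ∧ b ≤ M
      · rw [if_pos hold, if_pos ⟨hold.1, by omega, hold.2.2.1, hold.2.2.2⟩]
      · rw [if_neg hold, if_neg (by omega)]

theorem colpass_inner (N M : Nat) (j : Int) (hj : 1 ≤ j) (hjM : j ≤ (M : Int)) :
    ∀ (K : Nat), K ≤ N → ∀ dp, Dims dp (N + 2) (M + 2) →
    Dims ((List.range K).foldl (fun dp (k : Nat) => colStepA dp j (1 + (k : Int))) dp) (N + 2) (M + 2) ∧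
    ∀ a b : Nat, gget ((List.range K).foldl (fun dp (k : Nat) => colStepA dp j (1 + (k : Int))) dp) a b
      = if (b : Int) = j ∧ 1 ≤ a ∧ a ≤ K then ∑ t ∈ Finset.range (a + 1), gget dp t b
        else gget dp a b := by
  intro K
  induction K with
  | zero =>
    intro _ dp hd
    refine ⟨by simpa using hd, fun a b => ?_⟩
    simp only [List.range_zero, List.foldl_nil]
    rw [if_neg (by omega)]
  | succ K ih =>
    intro hK dp hd
    obtain ⟨hDK, hGK⟩ := ih (by omega) dp hd
    rw [List.range_succ, List.foldl_append, List.foldl_cons, List.foldl_nil]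
    set dpK := (List.range K).foldl (fun dp (k : Nat) => colStepA dp j (1 + (k : Int))) dp with hdpK
    have hval : pvGet2 dpK (1 + (K : Int) - 1) j = ∑ t ∈ Finset.range (K + 1), gget dp t j.toNat := by
      have h1 : (1 + (K : Int) - 1) = (K : Int) := by ring
      rw [h1]
      have : pvGet2 dpK (K : Int) j = gget dpK K j.toNat := by
        simp [pvGet2, gget]
      rw [this, hGK K j.toNat]
      by_cases hK1 : 1 ≤ K
      · rw [if_pos ⟨by omega, hK1, le_refl K⟩]
      · have hK0 : K = 0 := by omega
        subst hK0
        rw [if_neg (by omega), Finset.sum_range_one]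
    have hbump := fun (a b : Nat) => gget_pvBump dpK (N+2) (M+2) (1 + (K:Int)) j hDK
      (by omega) (by omega) (by push_cast; omega) (by omega) (pvGet2 dpK (1 + (K : Int) - 1) j) a b
    refine ⟨Dims_pvBump dpK (N+2) (M+2) (1+(K:Int)) j _ hDK, fun a b => ?_⟩
    rw [colStepA, hbump a b, hval, hGK a b]
    by_cases hab : (a : Int) = 1 + (K : Int) ∧ (b : Int) = j
    · have hb : b = j.toNat := by omega
      have ha : a = K + 1 := by omega
      subst ha hb
      rw [if_neg (by omega), if_pos ⟨hab.1, hab.2⟩, if_pos ⟨by omega, by omega, by omega⟩]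
      rw [Finset.sum_range_succ, Finset.sum_range_succ, Finset.sum_range_succ]
      ring
    · rw [if_neg hab, add_zero]
      by_cases hold : (b : Int) = j ∧ 1 ≤ a ∧ a ≤ K
      · rw [if_pos hold, if_pos ⟨hold.1, hold.2.1, by omega⟩]
      · rw [if_neg hold, if_neg (by omega)]

theorem colpass (N M : Nat) :
    ∀ (J : Nat), J ≤ M → ∀ dp, Dims dp (N + 2) (M + 2) →
    Dims ((List.range J).foldl
        (fun dp (k : Nat) => (List.range N).foldl (fun dp (k2 : Nat) => colStepA dp (1 + (k : Int)) (1 + (k2 : Int))) dp)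
        dp) (N + 2) (M + 2) ∧
    ∀ a b : Nat, gget ((List.range J).foldl
        (fun dp (k : Nat) => (List.range N).foldl (fun dp (k2 : Nat) => colStepA dp (1 + (k : Int)) (1 + (k2 : Int))) dp)
        dp) a b
      = if 1 ≤ b ∧ b ≤ J ∧ 1 ≤ a ∧ a ≤ N then ∑ t ∈ Finset.range (a + 1), gget dp t b
        else gget dp a b := by
  intro J
  induction J with
  | zero =>
    intro _ dp hd
    refine ⟨by simpa using hd, fun a b => ?_⟩
    simp only [List.range_zero, List.foldl_nil]
    rw [if_neg (by omega)]
  | succ J ih =>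
    intro hJ dp hd
    obtain ⟨hDJ, hGJ⟩ := ih (by omega) dp hd
    rw [List.range_succ, List.foldl_append, List.foldl_cons, List.foldl_nil]
    set dpJ := (List.range J).foldl
        (fun dp (k : Nat) => (List.range N).foldl (fun dp (k2 : Nat) => colStepA dp (1 + (k : Int)) (1 + (k2 : Int))) dp)
        dp with hdpJ
    obtain ⟨hDs, hGs⟩ := colpass_inner N M (1 + (J : Int)) (by omega) (by omega) N (le_refl N) dpJ hDJ
    refine ⟨hDs, fun a b => ?_⟩
    rw [hGs a b]
    by_cases hcol : (b : Int) = 1 + (J : Int)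
    · have hb : b = J + 1 := by omega
      subst hb
      by_cases ha : 1 ≤ a ∧ a ≤ N
      · rw [if_pos ⟨hcol, ha.1, ha.2⟩, if_pos ⟨by omega, by omega, ha.1, ha.2⟩]
        refine Finset.sum_congr rfl fun t _ => ?_
        rw [hGJ t (J + 1), if_neg (by omega)]
      · rw [if_neg (by omega), if_neg (by omega), hGJ a (J + 1), if_neg (by omega)]
    · rw [if_neg (by omega), hGJ a b]
      by_cases hold : 1 ≤ b ∧ b ≤ J ∧ 1 ≤ a ∧ a ≤ N
      · rw [if_pos hold, if_pos ⟨hold.1, by omega, hold.2.2.1, hold.2.2.2⟩]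
      · rw [if_neg hold, if_neg (by omega)]

theorem foldl_dec (M : Nat) (q : Nat → Int) (c : Int) :
    (List.range M).foldl (fun acc j => if q j ≤ 0 then acc - 1 else acc) c
      = c + ∑ j ∈ Finset.range M, (if q j ≤ 0 then (-1 : Int) else 0) := by
  induction M generalizing c with
  | zero => simp
  | succ M ih =>
    rw [List.range_succ, List.foldl_append, List.foldl_cons, List.foldl_nil, ih,
      Finset.sum_range_succ]
    split_ifs <;> ring

theorem foldl_inc (M : Nat) (q : Nat → Int) (c : Int) :
    (List.range M).foldl (fun acc j => if 0 < q j then acc + 1 else acc) c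
      = c + ∑ j ∈ Finset.range M, (if 0 < q j then (1 : Int) else 0) := by
  induction M generalizing c with
  | zero => simp
  | succ M ih =>
    rw [List.range_succ, List.foldl_append, List.foldl_cons, List.foldl_nil, ih,
      Finset.sum_range_succ]
    split_ifs <;> ring

theorem foldl_acc_sum (N : Nat) (S : Nat → Int) (c : Int) :
    (List.range N).foldl (fun acc i => acc + S i) c = c + ∑ i ∈ Finset.range N, S i := by
  induction N generalizing c with
  | zero => simp
  | succ N ih =>
    rw [List.range_succ, List.foldl_append, List.foldl_cons, List.foldl_nil, ih,
      Finset.sum_range_succ]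
    ring

theorem foldl2_count (N M : Nat) (f : Nat → Nat → Int) :
    (List.range N).foldl
        (fun acc i => (List.range M).foldl (fun acc j => if f i j ≤ 0 then acc - 1 else acc) acc)
        ((N : Int) * (M : Int))
      = (List.range N).foldl
        (fun acc i => (List.range M).foldl (fun acc j => if 0 < f i j then acc + 1 else acc) acc)
        0 := by
  have h1 : ∀ (c : Int) (i : Nat),
      (List.range M).foldl (fun acc j => if f i j ≤ 0 then acc - 1 else acc) c
        = c + ∑ j ∈ Finset.range M, (if f i j ≤ 0 then (-1 : Int) else 0) :=
    fun c i => foldl_dec M (f i) c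
  have h2 : ∀ (c : Int) (i : Nat),
      (List.range M).foldl (fun acc j => if 0 < f i j then acc + 1 else acc) c
        = c + ∑ j ∈ Finset.range M, (if 0 < f i j then (1 : Int) else 0) :=
    fun c i => foldl_inc M (f i) c
  calc (List.range N).foldl
        (fun acc i => (List.range M).foldl (fun acc j => if f i j ≤ 0 then acc - 1 else acc) acc)
        ((N : Int) * (M : Int))
      = (List.range N).foldl
        (fun acc i => acc + ∑ j ∈ Finset.range M, (if f i j ≤ 0 then (-1 : Int) else 0))
        ((N : Int) * (M : Int)) := by
        exact PySem.List.foldl_congr_mem _ _ _ _ (fun acc x hx => h1 acc x)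
    _ = (N : Int) * (M : Int)
        + ∑ i ∈ Finset.range N, ∑ j ∈ Finset.range M, (if f i j ≤ 0 then (-1 : Int) else 0) := by
        exact foldl_acc_sum N _ _
    _ = 0 + ∑ i ∈ Finset.range N, ∑ j ∈ Finset.range M, (if 0 < f i j then (1 : Int) else 0) := by
        have h3 : ∀ i j, (if 0 < f i j then (1 : Int) else 0)
            = 1 + (if f i j ≤ 0 then (-1 : Int) else 0) := fun i j => by split_ifs <;> omega
        simp only [h3, Finset.sum_add_distrib, Finset.sum_const, Finset.card_range,
          nsmul_eq_mul, mul_one]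
        ring
    _ = (List.range N).foldl
        (fun acc i => acc + ∑ j ∈ Finset.range M, (if 0 < f i j then (1 : Int) else 0)) 0 := by
        rw [foldl_acc_sum N _ _]
    _ = (List.range N).foldl
        (fun acc i => (List.range M).foldl (fun acc j => if 0 < f i j then acc + 1 else acc) acc)
        0 := by
        exact PySem.List.foldl_congr_mem _ _ _ _ (fun acc x hx => (h2 acc x).symm)

theorem main_eq (board : List (List Int)) (skill : List (List Int))
    (hsk : ∀ s ∈ skill, SkOK board.length (board.headD []).length s) :
    solution board skill = solution_alt board skill := by
  set N := board.length with hN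
  set M := (board.headD []).length with hM
  rw [solution, solution_alt]
  simp only [PySem.List.pyRange_one, List.foldl_map]
  rw [show ((N : Int) + 1 - 1) = ((N : Nat) : Int) from by ring,
      show ((M : Int) + 1 - 1) = ((M : Nat) : Int) from by ring]
  rw [show ((N : Int) - 0) = ((N : Nat) : Int) from by ring,
      show ((M : Int) - 0) = ((M : Nat) : Int) from by ring]
  simp only [Int.toNat_natCast, zero_add]
  have hd0 := dp0_dims N M
  obtain ⟨hD1, hG1⟩ := skFold_char N M skill hsk _ hd0
  obtain ⟨hD2, hG2⟩ := rowpass N M N (le_refl N) _ hD1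
  obtain ⟨hD3, hG3⟩ := colpass N M M (le_refl M) _ hD2
  set dp1v := skill.foldl skStepA (List.replicate (N + 2) (List.replicate (M + 2) (0 : Int))) with hdp1v
  set dp2v := (List.range N).foldl
      (fun dp (k : Nat) => (List.range M).foldl
        (fun dp (k2 : Nat) => rowStepA dp (1 + (k : Int)) (1 + (k2 : Int))) dp) dp1v with hdp2v
  set dp3v := (List.range M).foldl
      (fun dp (k : Nat) => (List.range N).foldl
        (fun dp (k2 : Nat) => colStepA dp (1 + (k : Int)) (1 + (k2 : Int))) dp) dp2v with hdp3v
  have h1 : ∀ a b : Nat, gget dp1v a b = (skill.map (fun s => cornerAt s a b)).sum := by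
    intro a b
    rw [hG1 a b, dp0_gget, zero_add]
  have key : ∀ k k2 : Nat, k < N → k2 < M →
      gget dp3v (k + 1) (k2 + 1) = (skill.map (effAt (k : Int) (k2 : Int))).sum := by
    intro k k2 hk hk2
    rw [hG3 (k + 1) (k2 + 1), if_pos ⟨by omega, by omega, by omega, by omega⟩]
    have hstep : ∀ t ∈ Finset.range (k + 1 + 1), gget dp2v t (k2 + 1)
        = ∑ u ∈ Finset.range (k2 + 1 + 1), (skill.map (fun s => cornerAt s t u)).sum := by
      intro t ht
      by_cases ht1 : 1 ≤ t
      · rw [hG2 t (k2 + 1), if_pos ⟨ht1, by simp at ht; omega, by omega, by omega⟩]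
        exact Finset.sum_congr rfl fun u _ => h1 t u
      · have ht0 : t = 0 := by omega
        subst ht0
        rw [hG2 0 (k2 + 1), if_neg (by omega), h1 0 (k2 + 1)]
        rw [List.sum_eq_zero (fun x hx => by
          obtain ⟨s, hsmem, rfl⟩ := List.mem_map.mp hx
          exact cornerAt_row0 N M s (hsk s hsmem) (k2 + 1))]
        refine (Finset.sum_eq_zero fun u _ => ?_).symm
        rw [List.sum_eq_zero (fun x hx => by
          obtain ⟨s, hsmem, rfl⟩ := List.mem_map.mp hx
          exact cornerAt_row0 N M s (hsk s hsmem) u)]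
    rw [Finset.sum_congr rfl hstep, sum_swap_list skill (fun s a b => cornerAt s a b) (k + 1 + 1) (k2 + 1 + 1)]
    exact congrArg List.sum
      (List.map_congr_left fun s hsmem => corner_rect N M s (hsk s hsmem) k k2)
  have eboard : ∀ (y y2 : Nat), pvGet2 board (y : Int) (y2 : Int) = gget board y y2 := by
    intro y y2; simp [pvGet2, gget]
  have hAside : (List.range N).foldl
      (fun acc (y : Nat) => (List.range M).foldl
        (fun acc2 (y2 : Nat) => cellStepA board dp3v acc2 (y : Int) (y2 : Int)) acc)
      ((N : Int) * (M : Int))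
      = (List.range N).foldl
      (fun acc (y : Nat) => (List.range M).foldl
        (fun acc2 (y2 : Nat) =>
          if gget board y y2 + (skill.map (effAt (y : Int) (y2 : Int))).sum ≤ 0 then acc2 - 1 else acc2) acc)
      ((N : Int) * (M : Int)) := by
    refine PySem.List.foldl_congr_mem _ _ _ _ (fun acc y hy => ?_)
    refine PySem.List.foldl_congr_mem _ _ _ _ (fun acc2 y2 hy2 => ?_)
    have hyN : y < N := List.mem_range.mp hy
    have hy2M : y2 < M := List.mem_range.mp hy2
    rw [cellStepA, eboard y y2]
    have e2 : pvGet2 dp3v ((y : Int) + 1) ((y2 : Int) + 1) = gget dp3v (y + 1) (y2 + 1) := by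
      rw [show ((y : Int) + 1) = ((y + 1 : Nat) : Int) from by push_cast; ring,
          show ((y2 : Int) + 1) = ((y2 + 1 : Nat) : Int) from by push_cast; ring]
      simp [pvGet2, gget]
    rw [e2, key y y2 hyN hy2M]
  have hBside : (List.range N).foldl
      (fun (acc : Int) (y : Nat) => (List.range M).foldl
        (fun (acc2 : Int) (y2 : Nat) =>
          if 0 < skill.foldl (cellAddB (y : Int) (y2 : Int)) (pvGet2 board (y : Int) (y2 : Int))
          then acc2 + 1 else acc2) acc) 0
      = (List.range N).foldl
      (fun (acc : Int) (y : Nat) => (List.range M).foldl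
        (fun (acc2 : Int) (y2 : Nat) =>
          if 0 < gget board y y2 + (skill.map (effAt (y : Int) (y2 : Int))).sum then acc2 + 1 else acc2) acc)
      0 := by
    refine PySem.List.foldl_congr_mem _ _ _ _ (fun acc y hy => ?_)
    refine PySem.List.foldl_congr_mem _ _ _ _ (fun acc2 y2 hy2 => ?_)
    rw [foldB, eboard y y2]
  exact hAside.trans
    ((foldl2_count N M
        (fun y y2 => gget board y y2 + (skill.map (effAt (y : Int) (y2 : Int))).sum)).trans
      hBside.symm)

-- ===== VERDICT (by name: the statement is the Claim_ definition above) =====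
theorem solution_spec : Claim_equal_solution := by
  intro board skill _ hpre
  unfold Spec_solution
  exact main_eq board skill (fun s hs => hpre.2.2 s hs)
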